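-- pv_equiv track=rewrite | github.com/ForeverHaibara/Triple-SOS | triples/core/sdpsos/algebra/nc_poly_ring.py | generate_monoms_nc
-- ===== SOURCE A (Python) =====
-- from itertools import product
--
-- def generate_monoms_nc(nvars, degree, hom=True):
--     def generate_monom_nc_hom(nvars, degree):
--         return list(product(range(nvars), repeat=degree))
--
--     monoms = generate_monom_nc_hom(nvars, degree)
--     if not hom:
--         for i in range(degree - 1, -1, -1):
--             monoms += generate_monom_nc_hom(nvars, i)
--
--     def compress(monom):
--         m = []
--         pre = -1
--         cnt = 0
--         for x in monom:
--             if x == pre: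
--                 cnt += 1
--             else:
--                 m.append((pre, cnt))
--                 pre = x
--                 cnt = 1
--         m.append((pre, cnt))
--         return tuple(m[1:]) # remove the first element (which is -1)
--
--     monoms = [compress(monom) for monom in monoms]
--     dict_monoms = {monom: i for i, monom in enumerate(monoms)}
--     inv_monoms = monoms
--     return dict_monoms, inv_monoms
-- ===== SOURCE B (Python) =====
-- def generate_monoms_nc(nvars, degree, hom=True):
--     # Dynamic programming on the degree: the monomials of degree d (in product's
--     # lexicographic order) are obtained from those of degree d-1 by prepending each
--     # variable in turn, merging it into the leading run-length block when it repeats.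
--     layers = [[()]]
--     for _ in range(degree):
--         prev = layers[-1]
--         cur = []
--         for v in range(nvars):
--             for m in prev:
--                 if m and m[0][0] == v:
--                     cur.append(((v, m[0][1] + 1),) + m[1:])
--                 else:
--                     cur.append(((v, 1),) + m)
--         layers.append(cur)
--     if hom:
--         out = layers[-1]
--     else:
--         out = [m for lay in reversed(layers) for m in lay]
--     dict_monoms = {m: i for i, m in enumerate(out)}
--     return dict_monoms, out
-- ===== Notes on version B (the rewrite author's own statement) =====
-- stated objective: alternative
-- what changed: Instead of materializing all nvars^degree tuples with itertools.product and run-length compressing each one, B builds the monomial list by dynamic programming on the degree: each layer is obtained from the previous one by prepending every variable to every run-length-encoded monomial, merging repeats into the leading block.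
-- outside the precondition, e.g. on generate_monoms_nc(2, -1, True): A raises ValueError, B returns ({(): 0}, [()])
import Mathlib
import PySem

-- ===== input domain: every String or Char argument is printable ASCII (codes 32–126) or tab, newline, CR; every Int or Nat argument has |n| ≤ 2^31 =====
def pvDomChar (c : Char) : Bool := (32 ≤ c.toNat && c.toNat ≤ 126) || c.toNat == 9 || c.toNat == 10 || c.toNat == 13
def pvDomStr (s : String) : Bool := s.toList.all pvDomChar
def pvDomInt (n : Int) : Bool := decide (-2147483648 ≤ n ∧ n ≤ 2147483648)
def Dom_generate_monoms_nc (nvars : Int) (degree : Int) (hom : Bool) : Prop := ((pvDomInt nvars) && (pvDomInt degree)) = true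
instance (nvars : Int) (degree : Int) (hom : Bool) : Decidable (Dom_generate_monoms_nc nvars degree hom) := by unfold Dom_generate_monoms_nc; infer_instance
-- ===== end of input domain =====

-- B replaces materialize-all-tuples-then-compress by degree-by-degree dynamic programming on run-length-encoded monomials; objective: alternative.

-- ===== PORT A =====
-- itertools.product(range(nvars), repeat=degree) in Python's lexicographic order
def prodRepA (n : Nat) : Nat → List (List Int)
  | 0 => [[]]
  | d + 1 => ((List.range n).map (Int.ofNat : Nat → Int)).flatMap (fun x => (prodRepA n d).map (fun t => x :: t))

-- A's compress: fold with state (m, pre, cnt), append final block, drop the (-1,0) head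
def stepA (s : List (Int × Int) × Int × Int) (x : Int) : List (Int × Int) × Int × Int :=
  if x == s.2.1 then (s.1, s.2.1, s.2.2 + 1)
  else (s.1 ++ [(s.2.1, s.2.2)], x, 1)

def compressA (monom : List Int) : List (Int × Int) :=
  ((monom.foldl stepA ([], -1, 0)).1
    ++ [((monom.foldl stepA ([], -1, 0)).2.1, (monom.foldl stepA ([], -1, 0)).2.2)]).drop 1

def generate_monoms_nc (nvars : Int) (degree : Int) (hom : Bool) : (List (List (Int × Int) × Int)) × (List (List (Int × Int))) :=
  let monoms0 := prodRepA nvars.toNat degree.toNat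
  let monoms1 :=
    if hom then monoms0
    else (PySem.List.pyRange (degree - 1) (-1) (-1)).foldl
      (fun ms i => ms ++ prodRepA nvars.toNat i.toNat) monoms0
  let monoms := monoms1.map compressA
  let dict := (PySem.List.enumerate monoms).foldl
    (fun (d : PySem.Dict (List (Int × Int)) Int) p => d.insert p.2 p.1) PySem.Dict.empty
  (dict.items, monoms)

-- ===== PORT B =====
-- prepend variable v to a run-length-encoded monomial, merging into the leading block if it repeats
def pushFront (v : Int) (m : List (Int × Int)) : List (Int × Int) :=
  match m with
  | (w, c) :: rest => if w == v then (v, c + 1) :: rest else (v, 1) :: (w, c) :: rest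
  | [] => [(v, 1)]

-- one DP step: the next layer, every variable prepended to every monomial of the previous layer
def stepLayer (n : Nat) (prev : List (List (Int × Int))) : List (List (Int × Int)) :=
  ((List.range n).map (Int.ofNat : Nat → Int)).flatMap (fun v => prev.map (fun m => pushFront v m))

-- the layers list is kept newest-first (Python's append-and-index[-1] loop, cons-oriented)
def buildLayersRev (n : Nat) (d : Nat) : List (List (List (Int × Int))) :=
  (List.range d).foldl (fun layers _ => stepLayer n (layers.headD []) :: layers) [[[]]]

def generate_monoms_nc_alt (nvars : Int) (degree : Int) (hom : Bool) : (List (List (Int × Int) × Int)) × (List (List (Int × Int))) :=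
  let layers := buildLayersRev nvars.toNat degree.toNat
  let out := if hom then layers.headD [] else layers.flatMap (fun lay => lay)
  let dict := (PySem.List.enumerate out).foldl
    (fun (d : PySem.Dict (List (Int × Int)) Int) p => d.insert p.2 p.1) PySem.Dict.empty
  (dict.items, out)

-- ===== PRECONDITION & SPEC =====
-- Pre_ excludes degree < 0, where A raises ValueError (itertools.product with a negative repeat).
def Pre_generate_monoms_nc (nvars : Int) (degree : Int) (hom : Bool) : Prop := 0 ≤ degree
instance (nvars : Int) (degree : Int) (hom : Bool) : Decidable (Pre_generate_monoms_nc nvars degree hom) := by unfold Pre_generate_monoms_nc; infer_instance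

def pvWitness_generate_monoms_nc : Int × Int × Bool := (2, 2, true)

def Spec_generate_monoms_nc (nvars : Int) (degree : Int) (hom : Bool) (out : (List (List (Int × Int) × Int)) × (List (List (Int × Int)))) : Prop := out = generate_monoms_nc_alt nvars degree hom
instance (nvars : Int) (degree : Int) (hom : Bool) (out : (List (List (Int × Int) × Int)) × (List (List (Int × Int)))) : Decidable (Spec_generate_monoms_nc nvars degree hom out) := by unfold Spec_generate_monoms_nc; infer_instance

-- ===== CLAIM (what is proved, stated in full; the proofs are below) =====
def Claim_equal_generate_monoms_nc : Prop := ∀ (nvars : Int) (degree : Int) (hom : Bool), Dom_generate_monoms_nc nvars degree hom → Pre_generate_monoms_nc nvars degree hom → Spec_generate_monoms_nc nvars degree hom (generate_monoms_nc nvars degree hom)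

-- ===== LEMMAS AND PROOFS =====

-- run-length encoding, head first: the common characterisation of both programs
def rle (t : List Int) : List (Int × Int) := t.foldr pushFront []

-- pushB: pushFront acting at the back (a tail-first reading of A's compress fold)
def pushB (acc : List (Int × Int)) (x : Int) : List (Int × Int) :=
  match acc.getLast? with
  | some (w, c) => if w == x then acc.dropLast ++ [(x, c + 1)] else acc ++ [(x, 1)]
  | none => [(x, 1)]

-- pushB with a whole block of count c
def pushBlock (acc : List (Int × Int)) (x : Int) (c : Int) : List (Int × Int) :=
  match acc.getLast? with
  | some (w, cw) => if w == x then acc.dropLast ++ [(x, cw + c)] else acc ++ [(x, c)]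
  | none => [(x, c)]

-- append an RLE to acc, merging at the seam
def mergeR (acc : List (Int × Int)) (r : List (Int × Int)) : List (Int × Int) :=
  match r with
  | [] => acc
  | (v, c) :: r' => pushBlock acc v c ++ r'

theorem pushBlock_one (acc : List (Int × Int)) (x : Int) : pushBlock acc x 1 = pushB acc x := by
  unfold pushBlock pushB
  cases h : acc.getLast? with
  | none => rfl
  | some p => obtain ⟨w, c⟩ := p; by_cases hw : w = x <;> simp [hw]

theorem getLast?_pushBlock (acc : List (Int × Int)) (x : Int) (c : Int) :
    ∃ k : Int, (pushBlock acc x c).getLast? = some (x, k) := by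
  unfold pushBlock
  cases h : acc.getLast? with
  | none => exact ⟨c, rfl⟩
  | some p =>
    obtain ⟨w, cw⟩ := p
    by_cases hw : w = x
    · subst hw; simp
    · have hb : (w == x) = false := by simp [hw]
      simp [hb]

theorem pushBlock_last_eq (acc : List (Int × Int)) (x c k : Int)
    (h : acc.getLast? = some (x, k)) : pushBlock acc x c = acc.dropLast ++ [(x, k + c)] := by
  unfold pushBlock
  rw [h]
  simp

theorem pushBlock_last_ne (acc : List (Int × Int)) (x c w k : Int)
    (h : acc.getLast? = some (w, k)) (hwx : w ≠ x) : pushBlock acc x c = acc ++ [(x, c)] := by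
  unfold pushBlock
  rw [h]
  have hb : (w == x) = false := by simp [hwx]
  simp [hb]

theorem pushBlock_nil (x c : Int) : pushBlock [] x c = [(x, c)] := rfl

theorem pushBlock_pushBlock (acc : List (Int × Int)) (x : Int) (c c' : Int) :
    pushBlock (pushBlock acc x c) x c' = pushBlock acc x (c + c') := by
  cases h : acc.getLast? with
  | none =>
    have hacc : acc = [] := by cases acc with | nil => rfl | cons a l => simp at h
    subst hacc
    rw [pushBlock_nil, pushBlock_nil]
    rw [pushBlock_last_eq [(x, c)] x c' c (by simp)]
    simp
  | some p =>
    obtain ⟨w, cw⟩ := p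
    by_cases hw : w = x
    · have h' : acc.getLast? = some (x, cw) := by rw [h, hw]
      rw [pushBlock_last_eq acc x c cw h', pushBlock_last_eq acc x (c + c') cw h']
      rw [pushBlock_last_eq (acc.dropLast ++ [(x, cw + c)]) x c' (cw + c) List.getLast?_concat]
      rw [List.dropLast_concat]
      ring_nf
    · rw [pushBlock_last_ne acc x c w cw h hw, pushBlock_last_ne acc x (c + c') w cw h hw]
      rw [pushBlock_last_eq (acc ++ [(x, c)]) x c' c List.getLast?_concat]
      rw [List.dropLast_concat]

theorem mergeR_pushB (acc : List (Int × Int)) (x : Int) (r : List (Int × Int)) :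
    mergeR (pushB acc x) r = mergeR acc (pushFront x r) := by
  cases r with
  | nil => simp [mergeR, pushFront, pushBlock_one]
  | cons p r' =>
    obtain ⟨v, c⟩ := p
    by_cases hv : v = x
    · subst hv
      simp only [mergeR, pushFront, beq_self_eq_true, if_pos]
      rw [← pushBlock_one, pushBlock_pushBlock]
      rw [show (1 : Int) + c = c + 1 by ring]
    · have hb : (v == x) = false := by simp [hv]
      simp only [mergeR, pushFront, hb, Bool.false_eq_true, if_neg, not_false_iff]
      rw [← pushBlock_one]
      obtain ⟨k, hk⟩ := getLast?_pushBlock acc x 1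
      rw [pushBlock_last_ne (pushBlock acc x 1) v c x k hk (fun hh => hv hh.symm)]
      simp [List.append_assoc]

-- the left fold of pushB is rle, merged onto the accumulator at the seam
theorem foldl_pushB_eq (t : List Int) : ∀ (acc : List (Int × Int)),
    t.foldl pushB acc = mergeR acc (rle t) := by
  induction t with
  | nil => intro acc; rfl
  | cons x xs ih =>
    intro acc
    show (xs.foldl pushB (pushB acc x)) = mergeR acc (rle (x :: xs))
    rw [ih (pushB acc x)]
    exact mergeR_pushB acc x (rle xs)

theorem foldl_pushB_nil (t : List Int) : t.foldl pushB [] = rle t := by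
  rw [foldl_pushB_eq]
  cases h : rle t with
  | nil => rfl
  | cons p r' => obtain ⟨v, c⟩ := p; simp [mergeR, pushBlock]

-- A's compress fold, with the state (m, pre, cnt) read back as m ++ [(pre, cnt)], is a pushB fold
theorem compress_fold : ∀ (t : List Int) (m : List (Int × Int)) (pre cnt : Int),
    (t.foldl stepA (m, pre, cnt)).1
      ++ [((t.foldl stepA (m, pre, cnt)).2.1, (t.foldl stepA (m, pre, cnt)).2.2)]
    = t.foldl pushB (m ++ [(pre, cnt)]) := by
  intro t
  induction t with
  | nil => intro m pre cnt; rfl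
  | cons x xs ih =>
    intro m pre cnt
    by_cases h : x = pre
    · subst h
      simp only [List.foldl_cons, stepA, beq_self_eq_true, if_pos]
      rw [ih]
      have hp : pushB (m ++ [(x, cnt)]) x = m ++ [(x, cnt + 1)] := by
        simp [pushB]
      rw [hp]
    · have hb : (x == pre) = false := by simp [h]
      simp only [List.foldl_cons, stepA, hb, Bool.false_eq_true, if_neg, not_false_iff]
      rw [ih]
      have hp : pushB (m ++ [(pre, cnt)]) x = (m ++ [(pre, cnt)]) ++ [(x, 1)] := by
        have hb2 : (pre == x) = false := by
          simp only [beq_eq_false_iff_ne, ne_eq]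
          exact fun hh => h hh.symm
        simp [pushB, hb2]
      rw [hp]

-- pushing a nonnegative symbol never merges into a leading (-1, 0) block
theorem push_sentinel (acc : List (Int × Int)) (x : Int) (hx : 0 ≤ x) :
    pushB ((-1, 0) :: acc) x = (-1, 0) :: pushB acc x := by
  match acc with
  | [] =>
    have hne : ((-1 : Int) == x) = false := by
      simp only [beq_eq_false_iff_ne, ne_eq]
      omega
    simp [pushB, hne]
  | a :: l =>
    simp only [pushB, List.getLast?_cons_cons]
    cases h : (a :: l).getLast? with
    | none => simp at h
    | some p =>
      obtain ⟨w, c⟩ := p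
      by_cases hw : w = x
      · subst hw
        simp [List.dropLast_cons₂]
      · have hb : (w == x) = false := by simp [hw]
        simp [hb]

theorem fold_sentinel (t : List Int) (ht : ∀ x ∈ t, 0 ≤ x) (acc : List (Int × Int)) :
    t.foldl pushB ((-1, 0) :: acc) = (-1, 0) :: t.foldl pushB acc := by
  induction t generalizing acc with
  | nil => rfl
  | cons x xs ih =>
    simp only [List.foldl_cons]
    rw [push_sentinel acc x (ht x (by simp)), ih (fun y hy => ht y (by simp [hy]))]

-- on tuples of nonnegative symbols, A's compress is exactly rle
theorem compressA_eq (t : List Int) (ht : ∀ x ∈ t, 0 ≤ x) :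
    compressA t = rle t := by
  unfold compressA
  rw [compress_fold t [] (-1) 0]
  rw [show (([] : List (Int × Int)) ++ [((-1 : Int), (0 : Int))]) = ((-1, 0) :: ([] : List (Int × Int))) from rfl]
  rw [fold_sentinel t ht]
  simp [foldl_pushB_nil]

-- symbols produced by prodRepA are nonnegative
theorem prodRepA_nonneg (n : Nat) : ∀ (d : Nat), ∀ t ∈ prodRepA n d, ∀ x ∈ t, 0 ≤ x := by
  intro d
  induction d with
  | zero => intro t htl x hx; simp [prodRepA] at htl; subst htl; simp at hx
  | succ r ih =>
    intro t htl x hx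
    simp only [prodRepA, List.mem_flatMap, List.mem_map] at htl
    obtain ⟨v, ⟨k, hk, rfl⟩, u, hu, rfl⟩ := htl
    rcases List.mem_cons.mp hx with h | h
    · subst h; exact Int.natCast_nonneg k
    · exact ih u hu x h

-- a layer of A's pipeline is a layer of B's DP
theorem layerA_eq (n d : Nat) : (prodRepA n d).map compressA = (prodRepA n d).map rle :=
  List.map_congr_left (fun t htl => compressA_eq t (prodRepA_nonneg n d t htl))

-- one DP step advances the rle image of prodRepA
theorem stepLayer_eq (n d : Nat) :
    stepLayer n ((prodRepA n d).map rle) = (prodRepA n (d + 1)).map rle := by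
  unfold stepLayer
  simp only [prodRepA, List.map_flatMap, List.map_map]
  rfl

-- the DP builds exactly the rle images of all the product layers, newest first
theorem buildLayersRev_eq (n : Nat) : ∀ (d : Nat),
    buildLayersRev n d = ((List.range (d + 1)).map (fun k => (prodRepA n k).map rle)).reverse := by
  intro d
  induction d with
  | zero => simp [buildLayersRev, prodRepA, rle]
  | succ r ih =>
    unfold buildLayersRev
    rw [List.range_succ, List.foldl_append]
    unfold buildLayersRev at ih
    rw [ih]
    simp only [List.foldl_cons, List.foldl_nil]
    rw [List.range_succ (n := r + 1), List.map_append, List.reverse_append]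
    rw [show ((List.range (r + 1)).map (fun k => (prodRepA n k).map rle)).reverse
        = (prodRepA n r).map rle
            :: ((List.range r).map (fun k => (prodRepA n k).map rle)).reverse by
      rw [List.range_succ, List.map_append, List.reverse_append]; rfl]
    simp only [List.headD_cons]
    rw [stepLayer_eq]
    rfl

theorem headD_buildLayersRev (n d : Nat) :
    (buildLayersRev n d).headD [] = (prodRepA n d).map rle := by
  rw [buildLayersRev_eq, List.range_succ, List.map_append, List.reverse_append]
  rfl

-- flattening the reversed layers = top layer ++ the countdown flatMap A performs
theorem reverse_flatten_eq (n : Nat) : ∀ (d : Nat),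
    (buildLayersRev n d).flatMap (fun lay => lay)
      = (prodRepA n d).map rle
        ++ (PySem.List.pyRange ((d : Int) - 1) (-1) (-1)).flatMap
            (fun i => (prodRepA n i.toNat).map rle) := by
  intro d
  induction d with
  | zero =>
    rw [show (((0 : Nat) : Int) - 1) = (-1 : Int) by norm_num]
    rw [show PySem.List.pyRange (-1) (-1) (-1) = [] from
      PySem.List.pyRange_neg_one_eq_nil (by omega)]
    simp [buildLayersRev, prodRepA, rle]
  | succ r ih =>
    rw [buildLayersRev_eq, List.range_succ, List.map_append, List.reverse_append,
      ← buildLayersRev_eq]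
    simp only [List.map_cons, List.map_nil, List.reverse_cons, List.reverse_nil,
      List.nil_append, List.singleton_append, List.flatMap_cons]
    rw [ih]
    rw [show (((r + 1 : Nat) : Int) - 1) = (r : Int) by push_cast; ring]
    rw [show PySem.List.pyRange ((r : Int)) (-1) (-1)
        = (r : Int) :: PySem.List.pyRange ((r : Int) - 1) (-1) (-1) from
      PySem.List.pyRange_neg_one_cons (by omega)]
    simp only [List.flatMap_cons, Int.toNat_natCast]

-- the full monomial lists agree
theorem monoms_eq (nvars degree : Int) (hom : Bool) (hd : 0 ≤ degree) :
    ((if hom then prodRepA nvars.toNat degree.toNat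
      else (PySem.List.pyRange (degree - 1) (-1) (-1)).foldl
        (fun ms i => ms ++ prodRepA nvars.toNat i.toNat) (prodRepA nvars.toNat degree.toNat)).map compressA)
    = (if hom then (buildLayersRev nvars.toNat degree.toNat).headD []
       else (buildLayersRev nvars.toNat degree.toNat).flatMap (fun lay => lay)) := by
  cases hom with
  | true =>
    simp only [if_pos]
    rw [headD_buildLayersRev, layerA_eq]
  | false =>
    simp only [Bool.false_eq_true, if_neg, not_false_iff]
    have hfold : (PySem.List.pyRange (degree - 1) (-1) (-1)).foldl
        (fun ms i => ms ++ prodRepA nvars.toNat i.toNat) (prodRepA nvars.toNat degree.toNat)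
        = prodRepA nvars.toNat degree.toNat
          ++ (PySem.List.pyRange (degree - 1) (-1) (-1)).flatMap
              (fun i => prodRepA nvars.toNat i.toNat) := by
      generalize (prodRepA nvars.toNat degree.toNat) = init
      generalize (PySem.List.pyRange (degree - 1) (-1) (-1)) = l
      induction l generalizing init with
      | nil => simp
      | cons a l ihl => simp [List.foldl_cons, ihl, List.append_assoc]
    rw [hfold, reverse_flatten_eq]
    rw [show ((degree.toNat : Int) - 1) = degree - 1 by omega]
    simp only [List.map_append, List.map_flatMap]
    rw [layerA_eq]
    congr 1
    apply List.flatMap_congr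
    intro i _
    exact layerA_eq nvars.toNat i.toNat

-- ===== VERDICT (by name: the statement is the Claim_ definition above) =====
theorem generate_monoms_nc_spec : Claim_equal_generate_monoms_nc := by
  intro nvars degree hom _ hpre
  unfold Spec_generate_monoms_nc
  have h := monoms_eq nvars degree hom hpre
  unfold generate_monoms_nc generate_monoms_nc_alt
  simp only [h]
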